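-- pv_equiv track=rewrite | github.com/sgiavasis/fcp-indi.github.com | docs/user/_sources/conf.py | _unireplace
-- ===== SOURCE A (Python) =====
-- def _unireplace(release_note, unireplace):
--     u = release_note.find('\\u')
--     if (u!=-1):
--         e = release_note[u:u+6]
--         e2 = str(e[2:])
--         release_note = release_note.replace(
--             e,
--             f" |u{e2}| "
--         )
--         unireplace[e2] = e
--         return(_unireplace(release_note, unireplace))
--     return(
--         release_note,
--             "\n\n".join([
--             f".. |u{u}| unicode:: {v}"
--         for u, v in list(unireplace.items())])
--     )
-- ===== SOURCE B (Python) =====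
-- def _unireplace(release_note, unireplace):
--     while (u := release_note.find('\\u')) != -1:
--         e = release_note[u:u + 6]
--         e2 = e[2:]
--         release_note = release_note.replace(e, f" |u{e2}| ")
--         unireplace[e2] = e
--     lines = []
--     for k, v in unireplace.items():
--         lines.append(f".. |u{k}| unicode:: {v}")
--     return release_note, "\n\n".join(lines)
-- ===== Notes on version B (the rewrite author's own statement) =====
-- stated objective: idiomatic
-- what changed: A's tail recursion is rewritten as an explicit while loop with a walrus find, and the final substitution block is built with an accumulating for loop instead of a list comprehension inside the recursive base case.
import Mathlib
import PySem

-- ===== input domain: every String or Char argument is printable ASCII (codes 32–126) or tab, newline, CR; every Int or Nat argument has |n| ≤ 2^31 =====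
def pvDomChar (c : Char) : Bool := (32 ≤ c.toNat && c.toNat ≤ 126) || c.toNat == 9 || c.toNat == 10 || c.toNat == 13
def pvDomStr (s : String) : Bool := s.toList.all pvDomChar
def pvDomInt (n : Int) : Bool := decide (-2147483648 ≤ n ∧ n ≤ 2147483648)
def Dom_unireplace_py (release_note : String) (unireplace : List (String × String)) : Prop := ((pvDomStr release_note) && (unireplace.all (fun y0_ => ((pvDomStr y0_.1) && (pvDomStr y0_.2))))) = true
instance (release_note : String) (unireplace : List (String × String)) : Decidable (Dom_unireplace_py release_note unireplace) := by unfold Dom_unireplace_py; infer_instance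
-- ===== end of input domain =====

-- B rewrites A's tail recursion as an explicit while loop and builds the final
-- substitution block with an accumulating loop instead of a comprehension in the
-- recursive base case (same return value; both assign unireplace[e2] = e in place).
-- Both ports run the loop with fuel = length + 1, which exceeds the number of
-- iterations of the Python loop (each step removes at least one '\u' occurrence).

-- ===== PORT A =====
-- f".. |u{u}| unicode:: {v}" for one dict item
def pvLineA (kv : List Char × List Char) : List Char :=
  ('.' :: '.' :: ' ' :: '|' :: 'u' :: kv.1) ++ ('|' :: ' ' :: 'u' :: 'n' :: 'i' :: 'c' :: 'o' :: 'd' :: 'e' :: ':' :: ':' :: ' ' :: kv.2)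

-- the tuple A returns in its base case (release_note, "\n\n".join([...]))
def pvBaseA (rn : List Char) (d : PySem.Dict (List Char) (List Char)) : String × String :=
  (String.ofList rn, String.ofList (PySem.Chars.join ['\n', '\n'] (d.items.map pvLineA)))

-- the recursion of _unireplace, step for step (fuel never runs out on the Python's inputs)
def pvRecA (fuel : Nat) (rn : List Char) (d : PySem.Dict (List Char) (List Char)) : String × String :=
  match fuel with
  | 0 => pvBaseA rn d
  | f + 1 =>
    let u := PySem.Chars.find rn ['\\', 'u']
    if u ≠ -1 then
      let e := PySem.Chars.slice rn (some u) (some (u + 6))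
      let e2 := PySem.Chars.slice e (some 2) none
      let rn' := PySem.Chars.replace rn e ((' ' :: '|' :: 'u' :: e2) ++ ['|', ' '])
      pvRecA f rn' (d.insert e2 e)
    else pvBaseA rn d

def unireplace_py (release_note : String) (unireplace : List (String × String)) : String × String :=
  pvRecA (release_note.toList.length + 1) release_note.toList
    (PySem.Dict.ofList (unireplace.map (fun kv => (kv.1.toList, kv.2.toList))))

-- ===== PORT B =====
-- the while loop: returns the loop STATE (release_note, unireplace) when find gives -1
def pvLoopB (fuel : Nat) (rn : List Char) (d : PySem.Dict (List Char) (List Char)) :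
    List Char × PySem.Dict (List Char) (List Char) :=
  match fuel with
  | 0 => (rn, d)
  | f + 1 =>
    let u := PySem.Chars.find rn ['\\', 'u']
    if u = -1 then (rn, d)
    else
      pvLoopB f
        (PySem.Chars.replace rn (PySem.Chars.slice rn (some u) (some (u + 6)))
          ((' ' :: '|' :: 'u' :: PySem.Chars.slice (PySem.Chars.slice rn (some u) (some (u + 6))) (some 2) none) ++ ['|', ' ']))
        (d.insert (PySem.Chars.slice (PySem.Chars.slice rn (some u) (some (u + 6))) (some 2) none)
          (PySem.Chars.slice rn (some u) (some (u + 6))))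

-- for k, v in unireplace.items(): lines.append(f".. |u{k}| unicode:: {v}")
def pvLinesB (items : List (List Char × List Char)) : List (List Char) :=
  items.foldl (fun acc kv =>
    acc ++ [('.' :: '.' :: ' ' :: '|' :: 'u' :: kv.1) ++ ('|' :: ' ' :: 'u' :: 'n' :: 'i' :: 'c' :: 'o' :: 'd' :: 'e' :: ':' :: ':' :: ' ' :: kv.2)]) []

def unireplace_py_alt (release_note : String) (unireplace : List (String × String)) : String × String :=
  let st := pvLoopB (release_note.toList.length + 1) release_note.toList
    (PySem.Dict.ofList (unireplace.map (fun kv => (kv.1.toList, kv.2.toList))))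
  (String.ofList st.1, String.ofList (PySem.Chars.join ['\n', '\n'] (pvLinesB st.2.items)))

-- ===== PRECONDITION & SPEC =====
def Spec_unireplace_py (release_note : String) (unireplace : List (String × String)) (out : String × String) : Prop := out = unireplace_py_alt release_note unireplace
instance (release_note : String) (unireplace : List (String × String)) (out : String × String) : Decidable (Spec_unireplace_py release_note unireplace out) := by unfold Spec_unireplace_py; infer_instance

-- ===== CLAIM (what is proved, stated in full; the proofs are below) =====
def Claim_equal_unireplace_py : Prop := ∀ (release_note : String) (unireplace : List (String × String)), Dom_unireplace_py release_note unireplace → Spec_unireplace_py release_note unireplace (unireplace_py release_note unireplace)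

-- ===== LEMMAS AND PROOFS =====

-- the accumulating loop of B builds exactly the mapped list of A's base case
theorem pvFoldlAppend {α β : Type} (f : α → β) (l : List α) (acc : List β) :
    l.foldl (fun acc kv => acc ++ [f kv]) acc = acc ++ l.map f := by
  induction l generalizing acc with
  | nil => simp
  | cons x xs ih => simp [List.foldl_cons, ih]

theorem pvLinesB_eq_map (items : List (List Char × List Char)) :
    pvLinesB items = items.map pvLineA := by
  unfold pvLinesB
  exact (pvFoldlAppend pvLineA items []).trans (by simp)

-- A's recursion equals B's loop followed by B's assembly, for any fuel
theorem pvRecA_eq_loopB (fuel : Nat) (rn : List Char) (d : PySem.Dict (List Char) (List Char)) :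
    pvRecA fuel rn d =
      (String.ofList (pvLoopB fuel rn d).1,
       String.ofList (PySem.Chars.join ['\n', '\n'] (pvLinesB (pvLoopB fuel rn d).2.items))) := by
  induction fuel generalizing rn d with
  | zero => simp [pvRecA, pvLoopB, pvBaseA, pvLinesB_eq_map]
  | succ f ih =>
    simp only [pvRecA, pvLoopB]
    by_cases h : PySem.Chars.find rn ['\\', 'u'] = -1
    · simp [h, pvBaseA, pvLinesB_eq_map]
    · simp only [h, if_pos (by simpa using h), ih, ite_false]

-- ===== VERDICT (by name: the statement is the Claim_ definition above) =====
theorem unireplace_py_spec : Claim_equal_unireplace_py := by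
  intro release_note unireplace _
  unfold Spec_unireplace_py unireplace_py unireplace_py_alt
  exact pvRecA_eq_loopB _ _ _
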